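-- pv_equiv track=rewrite | github.com/Mikesky109/Solving-Cross-River-Problem | Cross-River.py | WestnextStates
-- ===== SOURCE A (Python) =====
-- def WestnextStates(startnode,allstates): #when the boat is on the west side, find out what is the possible next steps for all states
--     possible=[startnode]
--     c1 = startnode.count("E")
--     for i in range(len(allstates)):
--         if (allstates[i].count("E") - c1 == 1 or allstates[i].count("E") - c1 == 2) and startnode != allstates[i]:
--             c = 0
--             for j in range(6):
--                 if allstates[i][j] == startnode[j]:
--                     c += 1
--             if c >= 4:
--                 possible.append(allstates[i])
--     return possible
-- ===== SOURCE B (Python) =====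
-- def WestnextStates(startnode, allstates):
--     # Bucket states by their "E"-count once, look up only the two relevant
--     # buckets, filter by prefix distance, and restore input order by index.
--     c1 = startnode.count("E")
--     buckets = {}
--     for i, s in enumerate(allstates):
--         buckets.setdefault(s.count("E"), []).append((i, s))
--     candidates = buckets.get(c1 + 1, []) + buckets.get(c1 + 2, [])
--     good = [(i, s) for i, s in candidates
--             if s != startnode and sum(x != y for x, y in zip(s[:6], startnode[:6])) <= 2]
--     good.sort(key=lambda t: t[0])
--     return [startnode] + [s for _, s in good]
-- ===== Notes on version B (the rewrite author's own statement) =====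
-- stated objective: alternative
-- what changed: B buckets the states by E-count into a dict in one pass, takes only the two relevant buckets (c1+1, c1+2), filters them by prefix mismatch count over zip, and restores input order by sorting on the stored index, instead of A's index loop with a nested 6-step match counter.
import Mathlib
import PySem

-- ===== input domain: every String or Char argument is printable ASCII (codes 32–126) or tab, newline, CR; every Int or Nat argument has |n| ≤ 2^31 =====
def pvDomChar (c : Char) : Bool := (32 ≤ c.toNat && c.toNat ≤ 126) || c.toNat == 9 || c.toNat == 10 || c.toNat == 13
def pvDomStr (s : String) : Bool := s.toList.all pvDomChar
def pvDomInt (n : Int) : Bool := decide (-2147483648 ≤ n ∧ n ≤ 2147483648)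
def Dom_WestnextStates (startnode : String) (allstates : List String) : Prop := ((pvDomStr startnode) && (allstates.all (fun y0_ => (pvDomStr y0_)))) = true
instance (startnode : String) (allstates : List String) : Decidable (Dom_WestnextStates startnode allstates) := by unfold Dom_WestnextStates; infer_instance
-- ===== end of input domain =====

-- B restructures A's scan: one bucketing pass by E-count, two bucket lookups, a zip-based
-- prefix-mismatch filter, and a sort by stored index to restore input order (objective: alternative).

-- ===== PORT A =====
def WestnextStates (startnode : String) (allstates : List String) : List String :=
  let possible : List String := [startnode]
  let c1 : Int := (PySem.Str.count startnode "E" : Int)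
  (PySem.List.pyRange 0 (allstates.length : Int) 1).foldl (fun possible i =>
    let si := PySem.List.pyGetD allstates i ""
    if ((PySem.Str.count si "E" : Int) - c1 = 1 ∨ (PySem.Str.count si "E" : Int) - c1 = 2)
        ∧ startnode ≠ si then
      let c : Int := (PySem.List.pyRange 0 6 1).foldl (fun c j =>
        if PySem.Str.pyGet? si j = PySem.Str.pyGet? startnode j then c + 1 else c) 0
      if 4 ≤ c then possible ++ [si] else possible
    else possible) possible

-- ===== PORT B =====
-- sum(x != y for x, y in zip(s[:6], t[:6]))
def pvMismatch6 (s t : String) : Nat :=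
  (((PySem.Str.slice s none (some 6)).toList).zip ((PySem.Str.slice t none (some 6)).toList)).countP
    (fun p => p.1 != p.2)

def WestnextStates_alt (startnode : String) (allstates : List String) : List String :=
  let c1 : Int := (PySem.Str.count startnode "E" : Int)
  let buckets : PySem.Dict Int (List (Int × String)) :=
    (PySem.List.enumerate allstates 0).foldl
      (fun d p => d.modify ((PySem.Str.count p.2 "E" : Int)) [] (fun l => l ++ [p]))
      PySem.Dict.empty
  let candidates := buckets.getD (c1 + 1) [] ++ buckets.getD (c1 + 2) []
  let good := candidates.filter (fun p => p.2 ≠ startnode ∧ pvMismatch6 p.2 startnode ≤ 2)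
  let sortedGood := PySem.List.sorted good (fun p => p.1) false
  [startnode] ++ sortedGood.map (fun p => p.2)

-- ===== PRECONDITION & SPEC =====
-- Pre_ excludes exactly the inputs where A's inner position loop indexes past the end of a
-- qualifying state or of startnode (Python IndexError); nothing else is excluded.
def Pre_WestnextStates (startnode : String) (allstates : List String) : Prop :=
  ∀ s ∈ allstates,
    (((PySem.Str.count s "E" : Int) - (PySem.Str.count startnode "E" : Int) = 1 ∨
      (PySem.Str.count s "E" : Int) - (PySem.Str.count startnode "E" : Int) = 2)
      ∧ startnode ≠ s) →
    6 ≤ s.toList.length ∧ 6 ≤ startnode.toList.length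
instance (startnode : String) (allstates : List String) : Decidable (Pre_WestnextStates startnode allstates) := by unfold Pre_WestnextStates; infer_instance

def pvWitness_WestnextStates : String × List String := ("EEEWWW", ["EEEEWW", "EEWWWW", "WWWEEE"])

def Spec_WestnextStates (startnode : String) (allstates : List String) (out : List String) : Prop := out = WestnextStates_alt startnode allstates
instance (startnode : String) (allstates : List String) (out : List String) : Decidable (Spec_WestnextStates startnode allstates out) := by unfold Spec_WestnextStates; infer_instance

-- ===== CLAIM (what is proved, stated in full; the proofs are below) =====
def Claim_equal_WestnextStates : Prop := ∀ (startnode : String) (allstates : List String), Dom_WestnextStates startnode allstates → Pre_WestnextStates startnode allstates → Spec_WestnextStates startnode allstates (WestnextStates startnode allstates)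

-- ===== LEMMAS AND PROOFS =====

-- A's inner 6-position match counter
def pvInner (startnode s : String) : Int :=
  (PySem.List.pyRange 0 6 1).foldl (fun c j =>
    if PySem.Str.pyGet? s j = PySem.Str.pyGet? startnode j then c + 1 else c) 0

-- the element predicate A's loop applies
def pvPredA (startnode : String) (s : String) : Bool :=
  decide ((((PySem.Str.count s "E" : Int) - (PySem.Str.count startnode "E" : Int) = 1 ∨
    (PySem.Str.count s "E" : Int) - (PySem.Str.count startnode "E" : Int) = 2)
    ∧ startnode ≠ s) ∧ 4 ≤ pvInner startnode s)

-- the element predicate B's pipeline applies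
def pvPredB (startnode s : String) : Bool :=
  decide ((((PySem.Str.count s "E" : Int) = (PySem.Str.count startnode "E" : Int) + 1 ∨
            (PySem.Str.count s "E" : Int) = (PySem.Str.count startnode "E" : Int) + 2))
          ∧ (s ≠ startnode ∧ pvMismatch6 s startnode ≤ 2))

theorem pv_A_eq (startnode : String) (allstates : List String) :
    WestnextStates startnode allstates
      = [startnode] ++ allstates.filter (pvPredA startnode) := by
  unfold WestnextStates
  simp only []
  rw [PySem.List.foldl_pyRange_zero_pyGetD' allstates ""
        (f := fun acc s =>
          if ((PySem.Str.count s "E" : Int) - (PySem.Str.count startnode "E" : Int) = 1 ∨ (PySem.Str.count s "E" : Int) - (PySem.Str.count startnode "E" : Int) = 2)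
              ∧ startnode ≠ s then
            if 4 ≤ ((PySem.List.pyRange 0 6 1).foldl (fun c j =>
                if PySem.Str.pyGet? s j = PySem.Str.pyGet? startnode j then c + 1 else c) (0:Int)) then acc ++ [s] else acc
          else acc)]
  have hfg : (fun (acc : List String) (s : String) =>
      if ((PySem.Str.count s "E" : Int) - (PySem.Str.count startnode "E" : Int) = 1 ∨ (PySem.Str.count s "E" : Int) - (PySem.Str.count startnode "E" : Int) = 2)
          ∧ startnode ≠ s then
        if 4 ≤ ((PySem.List.pyRange 0 6 1).foldl (fun c j =>
            if PySem.Str.pyGet? s j = PySem.Str.pyGet? startnode j then c + 1 else c) (0:Int)) then acc ++ [s] else acc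
      else acc)
      = (fun acc s => if pvPredA startnode s then acc ++ [s] else acc) := by
    funext acc s
    simp only [pvPredA, pvInner, decide_eq_true_eq]
    split_ifs <;> first | rfl | tauto
  rw [hfg, PySem.List.foldl_append_if_eq_filter]

theorem pv_six {l : List Char} (h : 6 ≤ l.length) :
    ∃ a b c d e f t, l = a::b::c::d::e::f::t := by
  rcases l with _|⟨a,l⟩; · simp at h
  rcases l with _|⟨b,l⟩; · simp at h
  rcases l with _|⟨c,l⟩; · simp at h
  rcases l with _|⟨d,l⟩; · simp at h
  rcases l with _|⟨e,l⟩; · simp at h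
  rcases l with _|⟨f,l⟩; · simp at h
  exact ⟨a,b,c,d,e,f,l,rfl⟩

theorem pv_get_lit (s : String) (a1 a2 a3 a4 a5 a6 : Char) (u : List Char)
    (h : s.toList = a1::a2::a3::a4::a5::a6::u) :
    PySem.Str.pyGet? s 0 = some a1 ∧ PySem.Str.pyGet? s 1 = some a2 ∧
    PySem.Str.pyGet? s 2 = some a3 ∧ PySem.Str.pyGet? s 3 = some a4 ∧
    PySem.Str.pyGet? s 4 = some a5 ∧ PySem.Str.pyGet? s 5 = some a6 := by
  refine ⟨?_, ?_, ?_, ?_, ?_, ?_⟩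
  all_goals
    simp only [PySem.Str.pyGet?, PySem.Chars.pyGet?, PySem.List.pyGet?, PySem.List.pyIdx?, h,
      List.length_cons]
    split_ifs <;> (try simp) <;> omega

theorem pv_slice_lit (s : String) (a1 a2 a3 a4 a5 a6 : Char) (u : List Char)
    (h : s.toList = a1::a2::a3::a4::a5::a6::u) :
    (PySem.Str.slice s none (some 6)).toList = [a1,a2,a3,a4,a5,a6] := by
  simp [PySem.Str.slice, PySem.Chars.slice, PySem.List.slice, h]

theorem pv_inner_iff (s t : String) (hs : 6 ≤ s.toList.length) (ht : 6 ≤ t.toList.length) :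
    (4 ≤ pvInner t s ↔ pvMismatch6 s t ≤ 2) := by
  obtain ⟨a1,a2,a3,a4,a5,a6,u,hu⟩ := pv_six hs
  obtain ⟨b1,b2,b3,b4,b5,b6,v,hv⟩ := pv_six ht
  obtain ⟨g0,g1,g2,g3,g4,g5⟩ := pv_get_lit s a1 a2 a3 a4 a5 a6 u hu
  obtain ⟨h0,h1,h2,h3,h4,h5⟩ := pv_get_lit t b1 b2 b3 b4 b5 b6 v hv
  have hr : PySem.List.pyRange 0 6 1 = [0,1,2,3,4,5] := by decide
  rw [pvInner, pvMismatch6, hr, pv_slice_lit s a1 a2 a3 a4 a5 a6 u hu,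
    pv_slice_lit t b1 b2 b3 b4 b5 b6 v hv]
  simp only [List.foldl, g0,g1,g2,g3,g4,g5,h0,h1,h2,h3,h4,h5, Option.some.injEq,
    List.zip, List.zipWith, List.countP_cons, List.countP_nil, bne_iff_ne, ne_eq]
  split_ifs <;> omega

theorem pv_enum_filter_map (xs : List String) (P : String → Bool) : ∀ (s : Int),
    (((PySem.List.enumerate xs s).filter (fun p => P p.2)).map (fun p => p.2)) = xs.filter P := by
  induction xs with
  | nil => intro s; simp [PySem.List.enumerate_nil]
  | cons a t ih =>
    intro s
    rw [PySem.List.enumerate_cons]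
    by_cases h : P a = true <;> simp [h, ih (s + 1)]

theorem pv_bucket (allstates : List String) (c : Int) :
    ((PySem.List.enumerate allstates 0).foldl
      (fun d p => d.modify ((PySem.Str.count p.2 "E" : Int)) [] (fun l => l ++ [p]))
      PySem.Dict.empty).getD c []
    = (PySem.List.enumerate allstates 0).filter (fun p => (PySem.Str.count p.2 "E" : Int) == c) := by
  have h1 : (PySem.List.enumerate allstates 0).foldl
      (fun d p => d.modify ((PySem.Str.count p.2 "E" : Int)) [] (fun l => l ++ [p]))
      PySem.Dict.empty
    = ((PySem.List.enumerate allstates 0).map (fun p => ((PySem.Str.count p.2 "E" : Int), p))).foldl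
      (fun d q => d.modify q.1 [] (fun l => l ++ [q.2])) PySem.Dict.empty := by
    rw [List.foldl_map]
  rw [h1, PySem.Dict.getD_foldl_modify_append]
  simp [List.filter_map, Function.comp_def, PySem.Dict.getD_empty]

theorem pv_filter_or_perm {α : Type} (l : List α) (p q : α → Bool)
    (h : ∀ x, ¬(p x = true ∧ q x = true)) :
    (l.filter p ++ l.filter q).Perm (l.filter (fun x => p x || q x)) := by
  induction l with
  | nil => simp
  | cons a t ih =>
    by_cases hp : p a = true
    · have hq : q a = false := by have := h a; cases hqa : q a <;> simp_all
      simpa [hp, hq] using ih.cons a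
    · by_cases hq : q a = true
      · simp only [List.filter_cons, hp, hq, Bool.false_or, if_true]
        simpa [hp, hq] using List.perm_middle.trans (ih.cons a)
      · simpa [hp, hq] using ih

theorem pv_B_eq (startnode : String) (allstates : List String) :
    WestnextStates_alt startnode allstates
      = [startnode] ++ allstates.filter (pvPredB startnode) := by
  unfold WestnextStates_alt
  simp only [pv_bucket]
  rw [List.filter_append]
  set L := PySem.List.enumerate allstates 0 with hL
  set c1 : Int := (PySem.Str.count startnode "E" : Int) with hc1
  rw [List.filter_filter, List.filter_filter]
  set r1 : Int × String → Bool := fun p =>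
    (decide (p.2 ≠ startnode ∧ pvMismatch6 p.2 startnode ≤ 2) && ((PySem.Str.count p.2 "E" : Int) == c1 + 1)) with hr1
  set r2 : Int × String → Bool := fun p =>
    (decide (p.2 ≠ startnode ∧ pvMismatch6 p.2 startnode ≤ 2) && ((PySem.Str.count p.2 "E" : Int) == c1 + 2)) with hr2
  have hdisj : ∀ p, ¬(r1 p = true ∧ r2 p = true) := by
    intro p
    simp only [hr1, hr2, Bool.and_eq_true, beq_iff_eq]
    rintro ⟨⟨-, h1⟩, ⟨-, h2⟩⟩
    omega
  have hsorted : PySem.List.sorted (L.filter r1 ++ L.filter r2) (fun p => p.1) false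
      = L.filter (fun p => r1 p || r2 p) := by
    apply PySem.List.sorted_eq_of_perm_of_pairwise_lt
    · exact (pv_filter_or_perm L r1 r2 hdisj).symm
    · exact (PySem.List.pairwise_lt_enumerate allstates 0).sublist List.filter_sublist
  rw [hsorted]
  have hpred : (fun p : Int × String => r1 p || r2 p) = (fun p : Int × String => pvPredB startnode p.2) := by
    funext p
    rw [Bool.eq_iff_iff]
    simp only [hr1, hr2, pvPredB, Bool.and_eq_true, beq_iff_eq, Bool.or_eq_true,
      decide_eq_true_eq]
    constructor
    · rintro (⟨hq, he⟩ | ⟨hq, he⟩) <;> exact ⟨by omega, hq⟩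
    · rintro ⟨he | he, hq⟩
      · exact Or.inl ⟨hq, by omega⟩
      · exact Or.inr ⟨hq, by omega⟩
  rw [hpred, pv_enum_filter_map]

theorem pv_pred_eq (sn s : String)
    (h : (((PySem.Str.count s "E" : Int) - (PySem.Str.count sn "E" : Int) = 1 ∨
           (PySem.Str.count s "E" : Int) - (PySem.Str.count sn "E" : Int) = 2) ∧ sn ≠ s) →
         6 ≤ s.toList.length ∧ 6 ≤ sn.toList.length) :
    pvPredA sn s = pvPredB sn s := by
  rw [Bool.eq_iff_iff]
  simp only [pvPredA, pvPredB, decide_eq_true_eq]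
  constructor
  · rintro ⟨⟨hc, hne⟩, hinner⟩
    obtain ⟨hs6, hsn6⟩ := h ⟨hc, hne⟩
    exact ⟨by omega, (Ne.symm hne), (pv_inner_iff s sn hs6 hsn6).1 hinner⟩
  · rintro ⟨hc, hne, hm⟩
    have hc' : (PySem.Str.count s "E" : Int) - (PySem.Str.count sn "E" : Int) = 1 ∨
        (PySem.Str.count s "E" : Int) - (PySem.Str.count sn "E" : Int) = 2 := by omega
    obtain ⟨hs6, hsn6⟩ := h ⟨hc', Ne.symm hne⟩
    exact ⟨⟨hc', Ne.symm hne⟩, (pv_inner_iff s sn hs6 hsn6).2 hm⟩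

-- ===== VERDICT (by name: the statement is the Claim_ definition above) =====
theorem WestnextStates_spec : Claim_equal_WestnextStates := by
  intro startnode allstates _ hpre
  unfold Spec_WestnextStates
  rw [pv_A_eq, pv_B_eq]
  exact congrArg _ (List.filter_congr (fun s hs => pv_pred_eq startnode s (hpre s hs)))
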